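-- pv_equiv track=rewrite | github.com/modelblocks/modelblocks-release | resource-gcg/scripts/gcgtree.py | deps
-- ===== SOURCE A (Python) =====
-- def deps( s, ops='abcdghirv' ):
--   lst = [ ]
--   d,h = 0,0
--   for i in range( len(s) ):
--     if s[i]=='{': d+=1
--     if s[i]=='}': d-=1
--     if d==0 and s[i]=='-' and h+1<len(s) and s[h]=='-' and s[h+1] in ops: lst += [ s[h:i] ]
--     if d==0 and s[i]=='-': h = i
--   if h+1<len(s) and s[h]=='-' and s[h+1] in ops: lst += [ s[h:] ]
--   return lst
-- ===== SOURCE B (Python) =====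
-- def deps(s, ops='abcdghirv'):
--     n = len(s)
--     # boundary starts: 0 plus every dash whose prefix has balanced braces
--     marks = [0] + [i for i in range(n)
--                    if s[i] == '-' and s[:i].count('{') == s[:i].count('}')]
--     ends = marks[1:] + [n]
--     return [s[a:b] for a, b in zip(marks, ends)
--             if a + 1 < n and s[a] == '-' and s[a + 1] in ops]
-- ===== Notes on version B (the rewrite author's own statement) =====
-- stated objective: alternative
-- what changed: Replaces A's single stateful scan (running brace-depth counter, moving boundary h, emit interleaved with state updates) by two stateless comprehensions: boundary dashes are the indices whose prefix s[:i] has equally many '{' and '}' (a prefix-count test, no depth accumulator), then segments are slices between consecutive boundaries filtered by a valid '-<op>' start.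
import Mathlib
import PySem

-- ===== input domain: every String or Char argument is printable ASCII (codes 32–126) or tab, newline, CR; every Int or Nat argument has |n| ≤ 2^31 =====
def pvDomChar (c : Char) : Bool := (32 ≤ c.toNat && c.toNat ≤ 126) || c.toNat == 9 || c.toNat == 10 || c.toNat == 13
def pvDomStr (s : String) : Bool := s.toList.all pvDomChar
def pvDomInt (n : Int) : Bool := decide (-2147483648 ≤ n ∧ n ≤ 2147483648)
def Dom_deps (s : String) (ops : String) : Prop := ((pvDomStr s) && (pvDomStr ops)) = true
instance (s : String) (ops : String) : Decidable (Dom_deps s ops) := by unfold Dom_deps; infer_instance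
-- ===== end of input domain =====

-- B replaces A's stateful depth-counter scan by two stateless comprehensions (boundary
-- dashes via a prefix brace-count equality test, then slices between boundaries); same
-- result, alternative decomposition, not faster.

-- ===== PORT A =====
-- A's for-loop over range(len(s)) as structural recursion over the character list,
-- carrying the same state (lst, d, h) and the running index i; s[x] for the in-range
-- indices h, h+1 is cs.getD, s[h:i] is (cs.drop h).take (i-h), s[h:] is cs.drop h
-- (exact for these nonnegative in-range indices).
def depsLoop (cs os : List Char) (n : Nat) :
    List Char → Nat → Int → Nat → List String → List String × Int × Nat
  | [], _, d, h, lst => (lst, d, h)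
  | c :: rest, i, d, h, lst =>
    let d := if c = '{' then d + 1 else d
    let d := if c = '}' then d - 1 else d
    let lst := if d = 0 ∧ c = '-' ∧ h + 1 < n ∧ cs.getD h ' ' = '-' ∧ cs.getD (h+1) ' ' ∈ os
               then lst ++ [String.mk ((cs.drop h).take (i - h))] else lst
    let h := if d = 0 ∧ c = '-' then i else h
    depsLoop cs os n rest (i+1) d h lst

-- the post-loop tail emission of A
def depsFinish (cs os : List Char) (st : List String × Int × Nat) : List String :=
  if st.2.2 + 1 < cs.length ∧ cs.getD st.2.2 ' ' = '-' ∧ cs.getD (st.2.2 + 1) ' ' ∈ os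
  then st.1 ++ [String.mk (cs.drop st.2.2)] else st.1

def deps (s : String) (ops : String) : List String :=
  let cs := s.toList
  let os := ops.toList
  depsFinish cs os (depsLoop cs os cs.length cs 0 0 0 [])

-- ===== PORT B =====
-- pass 1 of Source B: indices i with s[i] = '-' and s[:i].count('{') = s[:i].count('}')
def bMarks (cs : List Char) : List Nat :=
  (List.range cs.length).filter
    (fun i => cs.getD i ' ' == '-' && ((cs.take i).count '{' == (cs.take i).count '}'))

def deps_alt (s : String) (ops : String) : List String :=
  let cs := s.toList
  let os := ops.toList
  let n := cs.length
  let marks := 0 :: bMarks cs        -- Source B: marks = [0] + dashes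
  let ends := marks.tail ++ [n]      -- Source B: ends = marks[1:] + [n]
  ((marks.zip ends).filter
      (fun ab => decide (ab.1 + 1 < n ∧ cs.getD ab.1 ' ' = '-' ∧ cs.getD (ab.1 + 1) ' ' ∈ os))).map
    (fun ab => String.mk ((cs.drop ab.1).take (ab.2 - ab.1)))

-- ===== PRECONDITION & SPEC =====
def Spec_deps (s : String) (ops : String) (out : List String) : Prop := out = deps_alt s ops
instance (s : String) (ops : String) (out : List String) : Decidable (Spec_deps s ops out) := by unfold Spec_deps; infer_instance

-- ===== CLAIM (what is proved, stated in full; the proofs are below) =====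
def Claim_equal_deps : Prop := ∀ (s : String) (ops : String), Dom_deps s ops → Spec_deps s ops (deps s ops)

-- ===== LEMMAS AND PROOFS =====

-- segment emitted for a boundary pair (a, b)
def emitAt (cs os : List Char) (n a b : Nat) : List String :=
  if a + 1 < n ∧ cs.getD a ' ' = '-' ∧ cs.getD (a + 1) ' ' ∈ os
  then [String.mk ((cs.drop a).take (b - a))] else []

-- tail segment for the last boundary
def emitTail (cs os : List Char) (n a : Nat) : List String :=
  if a + 1 < n ∧ cs.getD a ' ' = '-' ∧ cs.getD (a + 1) ' ' ∈ os
  then [String.mk (cs.drop a)] else []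

-- segments for a boundary a followed by the further boundaries ms and the end n
def emitChain (cs os : List Char) (n : Nat) : Nat → List Nat → List String
  | a, [] => emitTail cs os n a
  | a, b :: ms => emitAt cs os n a b ++ emitChain cs os n b ms

theorem emitTail_eq_emitAt (cs os : List Char) (a : Nat) :
    emitTail cs os cs.length a = emitAt cs os cs.length a cs.length := by
  unfold emitTail emitAt
  rw [List.take_of_length_le (by simp)]

-- indices of top-level dashes as A's depth counter sees them
def marksOf : List Char → Int → Nat → List Nat
  | [], _, _ => []
  | c :: rest, d, i =>
    if c = '{' then marksOf rest (d + 1) (i + 1)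
    else if c = '}' then marksOf rest (d - 1) (i + 1)
    else if d = 0 ∧ c = '-' then i :: marksOf rest d (i + 1)
    else marksOf rest d (i + 1)

theorem depsLoop_emitChain (cs os : List Char) (rest : List Char) (i : Nat) (d : Int)
    (h : Nat) (lst : List String) :
    depsFinish cs os (depsLoop cs os cs.length rest i d h lst)
    = lst ++ emitChain cs os cs.length h (marksOf rest d i) := by
  induction rest generalizing i d h lst with
  | nil =>
    simp only [depsLoop, marksOf, emitChain, emitTail, depsFinish]
    split <;> simp
  | cons c rest ih =>
    by_cases hb : c = '{'
    · subst hb; simp [depsLoop, marksOf, ih]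
    · by_cases hc : c = '}'
      · subst hc; simp [depsLoop, marksOf, ih]
      · by_cases hm : c = '-'
        · subst hm
          by_cases hd0 : d = 0
          · subst hd0
            simp only [depsLoop, marksOf, ih, emitChain, emitAt,
              show ((('-' : Char) = '{') = False) from by simp,
              show ((('-' : Char) = '}') = False) from by simp,
              ite_false, ite_true, true_and]
            split <;> simp
          · simp [depsLoop, marksOf, hd0, ih]
        · simp [depsLoop, marksOf, hb, hc, hm, ih]

-- A's depth counter d equals (prefix count of '{') - (prefix count of '}'), so the
-- dash indices it collects are exactly B's prefix-count-filtered indices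
theorem marksOf_eq_filter (cs : List Char) : ∀ (rest pre : List Char), cs = pre ++ rest →
    marksOf rest ((pre.count '{' : Int) - (pre.count '}' : Int)) pre.length
    = (List.range' pre.length rest.length).filter
        (fun i => cs.getD i ' ' == '-' && ((cs.take i).count '{' == (cs.take i).count '}')) := by
  intro rest
  induction rest with
  | nil => intro pre _; simp [marksOf]
  | cons c rest ih =>
    intro pre hcs
    have hget : cs[pre.length]? = some c := by
      subst hcs
      rw [List.getElem?_append_right (Nat.le_refl _)]
      simp
    have htake : cs.take pre.length = pre := by
      subst hcs; simp
    have hrec : ∀ d', d' = ((pre ++ [c]).count '{' : Int) - ((pre ++ [c]).count '}' : Int) →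
        marksOf rest d' (pre.length + 1)
        = (List.range' (pre.length + 1) rest.length).filter
            (fun i => cs.getD i ' ' == '-' && ((cs.take i).count '{' == (cs.take i).count '}')) := by
      intro d' hd'
      have := ih (pre ++ [c]) (by simp [hcs])
      simpa [hd'] using this
    rw [List.length_cons, List.range'_succ, List.filter_cons]
    by_cases hb : c = '{'
    · subst hb
      rw [show marksOf ('{' :: rest) (↑(pre.count '{') - ↑(pre.count '}')) pre.length
            = marksOf rest ((↑(pre.count '{') - ↑(pre.count '}')) + 1) (pre.length + 1) from by
          simp [marksOf]]
      rw [hrec _ (by simp [List.count_append]; ring)]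
      simp [List.getD_eq_getElem?_getD, hget]
    · by_cases hc : c = '}'
      · subst hc
        rw [show marksOf ('}' :: rest) (↑(pre.count '{') - ↑(pre.count '}')) pre.length
              = marksOf rest ((↑(pre.count '{') - ↑(pre.count '}')) - 1) (pre.length + 1) from by
            simp [marksOf]]
        rw [hrec _ (by simp [List.count_append]; ring)]
        simp [List.getD_eq_getElem?_getD, hget]
      · have hcount : ((pre ++ [c]).count '{' : Int) - ((pre ++ [c]).count '}' : Int)
            = (pre.count '{' : Int) - (pre.count '}' : Int) := by
          simp [List.count_append, hb, hc]
        by_cases hm : c = '-'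
        · subst hm
          by_cases hd0 : (↑(pre.count '{') - (↑(pre.count '}') : Int)) = 0
          · rw [show marksOf ('-' :: rest) (↑(pre.count '{') - ↑(pre.count '}')) pre.length
                  = pre.length :: marksOf rest (↑(pre.count '{') - ↑(pre.count '}')) (pre.length + 1) from by
                simp [marksOf, hd0]]
            rw [hrec _ (by rw [hcount])]
            have : (pre.count '{' == pre.count '}') = true := by
              simp only [beq_iff_eq]; omega
            simp [List.getD_eq_getElem?_getD, hget, htake, this]
          · rw [show marksOf ('-' :: rest) (↑(pre.count '{') - ↑(pre.count '}')) pre.length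
                  = marksOf rest (↑(pre.count '{') - ↑(pre.count '}')) (pre.length + 1) from by
                simp [marksOf, hd0]]
            rw [hrec _ (by rw [hcount])]
            have : (pre.count '{' == pre.count '}') = false := by
              simp only [beq_eq_false_iff_ne, ne_eq]; omega
            simp [List.getD_eq_getElem?_getD, hget, htake, this]
        · rw [show marksOf (c :: rest) (↑(pre.count '{') - ↑(pre.count '}')) pre.length
                = marksOf rest (↑(pre.count '{') - ↑(pre.count '}')) (pre.length + 1) from by
              simp [marksOf, hb, hc, hm]]
          rw [hrec _ (by rw [hcount])]
          simp [List.getD_eq_getElem?_getD, hget, hm]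

theorem marksOf_eq_bMarks (cs : List Char) : marksOf cs 0 0 = bMarks cs := by
  have := marksOf_eq_filter cs cs [] (by simp)
  simpa [bMarks, List.range_eq_range'] using this

-- B's filter-then-map over consecutive boundary pairs equals emitChain
theorem filter_map_zip_emitChain (cs os : List Char) (a : Nat) (ms : List Nat) :
    (((a :: ms).zip (ms ++ [cs.length])).filter
        (fun ab => decide (ab.1 + 1 < cs.length ∧ cs.getD ab.1 ' ' = '-' ∧ cs.getD (ab.1 + 1) ' ' ∈ os))).map
      (fun ab => String.mk ((cs.drop ab.1).take (ab.2 - ab.1)))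
    = emitChain cs os cs.length a ms := by
  induction ms generalizing a with
  | nil =>
    simp only [List.nil_append, List.zip_cons_cons, List.zip_nil_right, List.filter_cons,
      List.filter_nil, emitChain]
    rw [emitTail_eq_emitAt]
    unfold emitAt
    by_cases hp : a + 1 < cs.length ∧ cs.getD a ' ' = '-' ∧ cs.getD (a + 1) ' ' ∈ os
    · rw [if_pos (decide_eq_true hp), if_pos hp]; simp
    · rw [if_neg (by simpa using hp), if_neg hp]; simp
  | cons b ms ih =>
    simp only [List.cons_append, List.zip_cons_cons, List.filter_cons, emitChain]
    unfold emitAt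
    by_cases hp : a + 1 < cs.length ∧ cs.getD a ' ' = '-' ∧ cs.getD (a + 1) ' ' ∈ os
    · rw [if_pos (decide_eq_true hp), if_pos hp]
      simp only [List.map_cons, ih b, List.singleton_append]
    · rw [if_neg (by simpa using hp), if_neg hp]
      exact ih b

-- ===== VERDICT (by name: the statement is the Claim_ definition above) =====
theorem deps_spec : Claim_equal_deps := by
  intro s ops _
  unfold Spec_deps
  show deps s ops = deps_alt s ops
  unfold deps deps_alt
  simp only [List.tail_cons]
  rw [depsLoop_emitChain, marksOf_eq_bMarks, List.nil_append]
  exact (filter_map_zip_emitChain s.toList ops.toList 0 (bMarks s.toList)).symm
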